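-- pv_equiv track=rewrite | github.com/akgram/VI | Lab/lab4 bcktrc.py | generate_rotations
-- ===== SOURCE A (Python) =====
-- def rotate_figure(figure): # za 90
--     return [(-y, x) for x, y in figure]
--
-- def generate_rotations(figures):
--     all_rotations = []
--     for figure in figures:
--         rotations = []
--         current = figure
--         for _ in range(4):  # do 4 rotacije
--             rotations.append(current)
--             current = rotate_figure(current)
--         all_rotations.append(rotations)
--     return all_rotations
-- ===== SOURCE B (Python) =====
-- def generate_rotations(figures):
--     return [
--         [
--             figure,
--             [(-y, x) for x, y in figure],
--             [(-x, -y) for x, y in figure],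
--             [(y, -x) for x, y in figure],
--         ]
--         for figure in figures
--     ]
-- ===== Notes on version B (the rewrite author's own statement) =====
-- stated objective: simpler
-- what changed: Each of the four orientations is computed by a direct closed-form coordinate transform of the original figure, instead of repeatedly re-applying rotate_figure to a running 'current' in a 4-step loop with an accumulator.
import Mathlib
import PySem

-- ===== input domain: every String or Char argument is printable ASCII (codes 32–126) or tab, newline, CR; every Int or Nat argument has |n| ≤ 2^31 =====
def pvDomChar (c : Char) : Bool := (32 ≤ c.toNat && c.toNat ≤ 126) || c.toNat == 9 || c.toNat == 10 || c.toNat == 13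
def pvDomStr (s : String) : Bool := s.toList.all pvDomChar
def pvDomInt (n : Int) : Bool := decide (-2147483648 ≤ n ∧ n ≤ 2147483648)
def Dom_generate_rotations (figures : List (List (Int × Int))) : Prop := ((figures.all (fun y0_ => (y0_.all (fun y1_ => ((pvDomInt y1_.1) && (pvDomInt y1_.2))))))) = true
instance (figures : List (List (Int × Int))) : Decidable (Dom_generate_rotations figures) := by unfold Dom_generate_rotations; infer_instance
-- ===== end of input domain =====

-- B: the four orientations via direct closed-form coordinate transforms per figure (simpler; no iterated rotate loop)


-- ===== PORT A =====
def rotate_figure (figure : List (Int × Int)) : List (Int × Int) :=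
  figure.map (fun p => (-p.2, p.1))

def generate_rotations (figures : List (List (Int × Int))) : List (List (List (Int × Int))) :=
  figures.foldl (fun all_rotations figure =>
    let st := (List.range 4).foldl
      (fun (st : List (List (Int × Int)) × List (Int × Int)) _ =>
        (st.1 ++ [st.2], rotate_figure st.2)) ([], figure)
    all_rotations ++ [st.1]) []

-- ===== PORT B =====
def generate_rotations_alt (figures : List (List (Int × Int))) : List (List (List (Int × Int))) :=
  figures.map (fun figure =>
    [figure,
     figure.map (fun p => (-p.2, p.1)),
     figure.map (fun p => (-p.1, -p.2)),
     figure.map (fun p => (p.2, -p.1))])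

-- ===== PRECONDITION & SPEC =====
def Spec_generate_rotations (figures : List (List (Int × Int))) (out : List (List (List (Int × Int)))) : Prop := out = generate_rotations_alt figures
instance (figures : List (List (Int × Int))) (out : List (List (List (Int × Int)))) : Decidable (Spec_generate_rotations figures out) := by unfold Spec_generate_rotations; infer_instance

-- ===== CLAIM (what is proved, stated in full; the proofs are below) =====
def Claim_equal_generate_rotations : Prop := ∀ (figures : List (List (Int × Int))), Dom_generate_rotations figures → Spec_generate_rotations figures (generate_rotations figures)

-- ===== LEMMAS AND PROOFS =====

-- ===== VERDICT (by name: the statement is the Claim_ definition above) =====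
theorem generate_rotations_cons (fig : List (Int × Int)) (figures : List (List (Int × Int)))
    (acc : List (List (List (Int × Int)))) :
    (fig :: figures).foldl (fun all_rotations figure =>
      let st := (List.range 4).foldl
        (fun (st : List (List (Int × Int)) × List (Int × Int)) _ =>
          (st.1 ++ [st.2], rotate_figure st.2)) ([], figure)
      all_rotations ++ [st.1]) acc
    = figures.foldl (fun all_rotations figure =>
        let st := (List.range 4).foldl
          (fun (st : List (List (Int × Int)) × List (Int × Int)) _ =>
            (st.1 ++ [st.2], rotate_figure st.2)) ([], figure)
        all_rotations ++ [st.1])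
      (acc ++ [[fig, rotate_figure fig, rotate_figure (rotate_figure fig),
                rotate_figure (rotate_figure (rotate_figure fig))]]) := by
  simp only [show List.range 4 = [0, 1, 2, 3] from by decide, List.foldl]
  simp

theorem generate_rotations_acc (figures : List (List (Int × Int)))
    (acc : List (List (List (Int × Int)))) :
    figures.foldl (fun all_rotations figure =>
      let st := (List.range 4).foldl
        (fun (st : List (List (Int × Int)) × List (Int × Int)) _ =>
          (st.1 ++ [st.2], rotate_figure st.2)) ([], figure)
      all_rotations ++ [st.1]) acc
    = acc ++ generate_rotations_alt figures := by
  induction figures generalizing acc with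
  | nil => simp [generate_rotations_alt]
  | cons fig rest ih =>
      rw [generate_rotations_cons, ih]
      simp [generate_rotations_alt, rotate_figure, List.map_map, Function.comp]

theorem generate_rotations_spec : Claim_equal_generate_rotations := by
  intro figures _
  show generate_rotations figures = generate_rotations_alt figures
  have := generate_rotations_acc figures []
  simpa [generate_rotations] using this
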